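-- pv_equiv track=rewrite | github.com/myusko/algosproblems | algos/arrays/launch_sequence_checker.py | launch_sequence_checker
-- ===== SOURCE A (Python) =====
-- from collections import defaultdict
--
-- def launch_sequence_checker(system_names, step_numbers):
--     pairs = defaultdict(int)
--
--     for i in range(len(system_names)):
--         if pairs[system_names[i]] < step_numbers[i]:
--             pairs[system_names[i]] = step_numbers[i]
--         else:
--             return False
--     return True
-- ===== SOURCE B (Python) =====
-- def _ascending(steps):
--     prev = 0
--     for x in steps:
--         if x <= prev:
--             return False
--         prev = x
--     return True
--
--
-- def launch_sequence_checker(system_names, step_numbers):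
--     groups = {}
--     for i in range(len(system_names)):
--         groups.setdefault(system_names[i], []).append(step_numbers[i])
--     return all(_ascending(steps) for steps in groups.values())
-- ===== Notes on version B (the rewrite author's own statement) =====
-- stated objective: simpler
-- what changed: B separates grouping from validation: one pass builds a dict from each system name to its list of step numbers, then each list is checked to be strictly increasing starting above 0, instead of A's single interleaved running-max pass with early return.
-- outside the precondition, e.g. on launch_sequence_checker(['a', 'a'], [0]): A returns False, B raises IndexError
import Mathlib
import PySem

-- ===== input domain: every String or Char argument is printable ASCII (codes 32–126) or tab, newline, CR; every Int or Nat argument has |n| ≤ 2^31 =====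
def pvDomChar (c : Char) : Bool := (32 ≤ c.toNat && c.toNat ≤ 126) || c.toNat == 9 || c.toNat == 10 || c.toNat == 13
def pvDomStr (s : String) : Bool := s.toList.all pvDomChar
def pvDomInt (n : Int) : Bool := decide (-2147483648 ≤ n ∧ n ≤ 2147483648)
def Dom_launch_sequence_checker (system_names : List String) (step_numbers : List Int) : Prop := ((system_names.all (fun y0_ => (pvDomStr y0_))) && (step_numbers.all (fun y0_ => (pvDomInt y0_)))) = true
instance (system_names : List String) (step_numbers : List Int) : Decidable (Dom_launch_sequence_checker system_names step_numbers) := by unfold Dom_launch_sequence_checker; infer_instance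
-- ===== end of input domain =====

-- B separates grouping (dict: system name -> its step list) from validation (each list strictly
-- increasing from above 0), replacing A's single interleaved running-max pass; objective: simpler.


-- ===== PORT A =====
-- the loop 'for i in range(len(system_names)): …' with its early 'return False';
-- the out-of-range defaults of pyGetD are never used under Pre_ (indices are in range there)
def lscGoA (sn : List String) (st : List Int) (pairs : PySem.Dict String Int) : List Int → Bool
  | [] => true
  | i :: rest =>
    let name := PySem.List.pyGetD sn i ""
    let step := PySem.List.pyGetD st i 0
    if pairs.getD name 0 < step then lscGoA sn st (pairs.insert name step) rest
    else false

def launch_sequence_checker (system_names : List String) (step_numbers : List Int) : Bool :=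
  lscGoA system_names step_numbers PySem.Dict.empty
    (PySem.List.pyRange 0 (system_names.length : Int) 1)

-- ===== PORT B =====
-- _ascending(steps): prev = 0; each element must exceed prev
def lscAscending : Int → List Int → Bool
  | _, [] => true
  | prev, x :: xs => if x ≤ prev then false else lscAscending x xs

-- the grouping loop: groups.setdefault(name, []).append(step) = d[name] = d.get(name, []) ++ [step]
def lscGroups (sn : List String) (st : List Int) : PySem.Dict String (List Int) :=
  (PySem.List.pyRange 0 (sn.length : Int) 1).foldl
    (fun g i => g.modify (PySem.List.pyGetD sn i "") [] (· ++ [PySem.List.pyGetD st i 0]))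
    PySem.Dict.empty

def launch_sequence_checker_alt (system_names : List String) (step_numbers : List Int) : Bool :=
  ((lscGroups system_names step_numbers).values).all (lscAscending 0)

-- ===== PRECONDITION & SPEC =====
-- Pre_ excludes mismatched parallel lists (fewer step numbers than system names): there A raises
-- IndexError unless some earlier step already failed the check (then A returns False), while B's
-- grouping pass always raises IndexError on them.
def Pre_launch_sequence_checker (system_names : List String) (step_numbers : List Int) : Prop :=
  system_names.length ≤ step_numbers.length
instance (system_names : List String) (step_numbers : List Int) : Decidable (Pre_launch_sequence_checker system_names step_numbers) := by unfold Pre_launch_sequence_checker; infer_instance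

def pvWitness_launch_sequence_checker : List String × List Int :=
  (["fuel", "nav", "fuel"], [1, 5, 2])

def Spec_launch_sequence_checker (system_names : List String) (step_numbers : List Int) (out : Bool) : Prop := out = launch_sequence_checker_alt system_names step_numbers
instance (system_names : List String) (step_numbers : List Int) (out : Bool) : Decidable (Spec_launch_sequence_checker system_names step_numbers out) := by unfold Spec_launch_sequence_checker; infer_instance

-- ===== CLAIM (what is proved, stated in full; the proofs are below) =====
def Claim_equal_launch_sequence_checker : Prop := ∀ (system_names : List String) (step_numbers : List Int), Dom_launch_sequence_checker system_names step_numbers → Pre_launch_sequence_checker system_names step_numbers → Spec_launch_sequence_checker system_names step_numbers (launch_sequence_checker system_names step_numbers)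

-- ===== LEMMAS AND PROOFS =====

-- A's loop restated over the zipped (name, step) pairs
def lscCheckZip (d : PySem.Dict String Int) : List (String × Int) → Bool
  | [] => true
  | (n, s) :: r => if d.getD n 0 < s then lscCheckZip (d.insert n s) r else false

-- B's grouping loop restated over the zipped pairs
def lscGroupZip (g : PySem.Dict String (List Int)) (ps : List (String × Int)) :
    PySem.Dict String (List Int) :=
  ps.foldl (fun g p => g.modify p.1 [] (· ++ [p.2])) g

-- the common characterisation: every system's step list is an ascending chain above its floor
def lscOk (d : PySem.Dict String Int) (ps : List (String × Int)) : Prop :=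
  ∀ n ∈ ps.map (·.1),
    lscAscending (d.getD n 0) ((ps.filter (fun p => p.1 == n)).map (·.2)) = true

lemma lscGoA_eq_checkZip (sn : List String) (st : List Int) (h : sn.length ≤ st.length) :
    ∀ (m k : Nat), sn.length - k ≤ m → ∀ d,
      lscGoA sn st d (PySem.List.pyRange (k : Int) (sn.length : Int) 1) =
        lscCheckZip d ((List.zip sn st).drop k) := by
  intro m
  induction m with
  | zero =>
    intro k hk d
    have hge : sn.length ≤ k := by omega
    rw [PySem.List.pyRange_one_eq_nil (by exact_mod_cast hge)]
    rw [List.drop_eq_nil_of_le (by simp; omega)]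
    rfl
  | succ m ih =>
    intro k hk d
    by_cases hlt : k < sn.length
    · rw [PySem.List.pyRange_one_cons (by exact_mod_cast hlt)]
      have hz : k < (List.zip sn st).length := by simp; omega
      rw [List.drop_eq_getElem_cons hz]
      have hk1 : ((k : Int) + 1) = ((k + 1 : Nat) : Int) := by push_cast; ring
      simp only [lscGoA, lscCheckZip, List.get_eq_getElem, List.getElem_zip,
        PySem.List.pyGetD_natCast, List.getD_eq_getElem?_getD,
        List.getElem?_eq_getElem hlt, List.getElem?_eq_getElem (by omega : k < st.length),
        Option.getD_some]
      split
      · rw [hk1, ih (k + 1) (by omega)]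
      · rfl
    · have hge : sn.length ≤ k := by omega
      rw [PySem.List.pyRange_one_eq_nil (by exact_mod_cast hge)]
      rw [List.drop_eq_nil_of_le (by simp; omega)]
      rfl

lemma lscGroups_eq_groupZip (sn : List String) (st : List Int) (h : sn.length ≤ st.length) :
    ∀ (m k : Nat), sn.length - k ≤ m → ∀ g,
      (PySem.List.pyRange (k : Int) (sn.length : Int) 1).foldl
        (fun g i => g.modify (PySem.List.pyGetD sn i "") [] (· ++ [PySem.List.pyGetD st i 0])) g =
        lscGroupZip g ((List.zip sn st).drop k) := by
  intro m
  induction m with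
  | zero =>
    intro k hk g
    have hge : sn.length ≤ k := by omega
    rw [PySem.List.pyRange_one_eq_nil (by exact_mod_cast hge)]
    rw [List.drop_eq_nil_of_le (by simp; omega)]
    rfl
  | succ m ih =>
    intro k hk g
    by_cases hlt : k < sn.length
    · rw [PySem.List.pyRange_one_cons (by exact_mod_cast hlt)]
      have hz : k < (List.zip sn st).length := by simp; omega
      rw [List.drop_eq_getElem_cons hz]
      have hk1 : ((k : Int) + 1) = ((k + 1 : Nat) : Int) := by push_cast; ring
      simp only [List.foldl_cons, lscGroupZip, List.getElem_zip,
        PySem.List.pyGetD_natCast, List.getD_eq_getElem?_getD,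
        List.getElem?_eq_getElem hlt, List.getElem?_eq_getElem (by omega : k < st.length),
        Option.getD_some]
      rw [hk1, ih (k + 1) (by omega)]
      rfl
    · have hge : sn.length ≤ k := by omega
      rw [PySem.List.pyRange_one_eq_nil (by exact_mod_cast hge)]
      rw [List.drop_eq_nil_of_le (by simp; omega)]
      rfl

-- A's zipped loop returns true exactly when every system's chain from its current floor is ascending
lemma lscCheckZip_iff (ps : List (String × Int)) :
    ∀ d, lscCheckZip d ps = true ↔ lscOk d ps := by
  induction ps with
  | nil => intro d; simp [lscCheckZip, lscOk]
  | cons p r ih =>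
    intro d
    obtain ⟨n, s⟩ := p
    have hfn : List.filter (fun p => p.1 == n) ((n, s) :: r) =
        (n, s) :: List.filter (fun p => p.1 == n) r :=
      List.filter_cons_of_pos (by simp)
    have hfm : ∀ m : String, m ≠ n → List.filter (fun p => p.1 == m) ((n, s) :: r) =
        List.filter (fun p => p.1 == m) r := by
      intro m hmn
      exact List.filter_cons_of_neg (by simpa using fun hx => hmn hx.symm)
    simp only [lscCheckZip]
    constructor
    · intro hch
      have hlt : d.getD n 0 < s := by by_contra hc; simp [if_neg hc] at hch
      rw [if_pos hlt] at hch
      have hr := (ih (d.insert n s)).mp hch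
      intro m hm
      by_cases hmn : m = n
      · subst hmn
        rw [hfn]
        simp only [List.map_cons, lscAscending]
        rw [if_neg (by omega)]
        by_cases hmem : m ∈ r.map (·.1)
        · have hx := hr m hmem
          rwa [PySem.Dict.getD_insert_self] at hx
        · have hfil : r.filter (fun p => p.1 == m) = [] := by
            rw [List.filter_eq_nil_iff]
            intro p hp hbeq
            exact hmem (List.mem_map.mpr ⟨p, hp, (eq_of_beq hbeq)⟩)
          simp [hfil, lscAscending]
      · have hm' : m ∈ r.map (·.1) := by
          simp only [List.map_cons, List.mem_cons] at hm
          exact hm.resolve_left hmn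
        have hx := hr m hm'
        rw [PySem.Dict.getD_insert_of_ne _ _ _ hmn] at hx
        rw [hfm m hmn]
        exact hx
    · intro hok
      have hn := hok n (by simp)
      rw [hfn] at hn
      simp only [List.map_cons, lscAscending] at hn
      have hlt : d.getD n 0 < s := by
        by_contra hc
        rw [if_pos (by omega)] at hn
        exact absurd hn (by simp)
      rw [if_neg (by omega)] at hn
      rw [if_pos hlt]
      apply (ih (d.insert n s)).mpr
      intro m hm
      by_cases hmn : m = n
      · subst hmn
        rwa [PySem.Dict.getD_insert_self]
      · have hx := hok m (by simp [hm])
        rw [hfm m hmn] at hx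
        rwa [PySem.Dict.getD_insert_of_ne _ _ _ hmn]

-- B's result is the same characterisation with the empty floor dict
lemma lscAlt_iff (ps : List (String × Int)) :
    (lscGroupZip PySem.Dict.empty ps).values.all (lscAscending 0) = true ↔
      lscOk PySem.Dict.empty ps := by
  have hnd : (lscGroupZip PySem.Dict.empty ps).keys.Nodup :=
    PySem.Dict.nodup_keys_foldl_modify_key ps (·.1) [] (fun _ p v => v ++ [p.2]) _
      PySem.Dict.nodup_keys_empty
  have hkeys : (lscGroupZip PySem.Dict.empty ps).keys =
      PySem.Set.update (PySem.Dict.empty : PySem.Dict String (List Int)).keys (ps.map (·.1)) :=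
    PySem.Dict.keys_foldl_modify_key ps (·.1) [] (fun _ p v => v ++ [p.2]) _
  have hget : ∀ n, (lscGroupZip PySem.Dict.empty ps).getD n [] =
      (ps.filter (fun p => p.1 == n)).map (·.2) := by
    intro n
    have hx := PySem.Dict.getD_foldl_modify_append ps
      (PySem.Dict.empty : PySem.Dict String (List Int)) n
    simpa [lscGroupZip] using hx
  rw [PySem.Dict.values_eq_map_keys _ hnd []]
  simp only [List.all_map, List.all_eq_true, lscOk]
  constructor
  · intro h n hn
    have hn' : n ∈ (lscGroupZip PySem.Dict.empty ps).keys := by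
      rw [hkeys, PySem.Set.mem_update]
      exact Or.inr hn
    have hx := h n hn'
    rw [Function.comp_apply, hget n] at hx
    simpa [PySem.Dict.getD_empty] using hx
  · intro h n hn
    rw [Function.comp_apply, hget n]
    have hn' : n ∈ ps.map (·.1) := by
      rw [hkeys, PySem.Set.mem_update] at hn
      simpa [PySem.Dict.keys_empty] using hn
    simpa [PySem.Dict.getD_empty] using h n hn'

-- ===== VERDICT (by name: the statement is the Claim_ definition above) =====
theorem launch_sequence_checker_spec : Claim_equal_launch_sequence_checker := by
  intro sn st _ hpre
  unfold Spec_launch_sequence_checker launch_sequence_checker launch_sequence_checker_alt lscGroups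
  have hA := lscGoA_eq_checkZip sn st hpre sn.length 0 (by omega) PySem.Dict.empty
  have hB := lscGroups_eq_groupZip sn st hpre sn.length 0 (by omega) PySem.Dict.empty
  simp only [Nat.cast_zero, List.drop_zero] at hA hB
  rw [hA, hB]
  have h1 := lscCheckZip_iff (List.zip sn st) PySem.Dict.empty
  have h2 := lscAlt_iff (List.zip sn st)
  by_cases hc : lscOk PySem.Dict.empty (List.zip sn st)
  · rw [h1.mpr hc, h2.mpr hc]
  · have ha : lscCheckZip PySem.Dict.empty (List.zip sn st) = false := by
      rcases Bool.eq_false_or_eq_true (lscCheckZip PySem.Dict.empty (List.zip sn st)) with hx | hx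
      · exact absurd (h1.mp hx) hc
      · exact hx
    have hb : (lscGroupZip PySem.Dict.empty (List.zip sn st)).values.all (lscAscending 0) = false := by
      rcases Bool.eq_false_or_eq_true ((lscGroupZip PySem.Dict.empty (List.zip sn st)).values.all (lscAscending 0)) with hx | hx
      · exact absurd (h2.mp hx) hc
      · exact hx
    rw [ha, hb]
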